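-- pv_equiv track=rewrite | github.com/triplelog/math-errors | calculus/other.py | fullparen
-- ===== SOURCE A (Python) =====
-- def fullparen(input_string):
-- 	openpar = 0
-- 	isbreak = 0
-- 	cancel_it = 0
-- 	really_cancel = 0
-- 	for idx,i in enumerate(input_string):
-- 		if i == '(':
-- 			openpar = openpar+1
-- 		elif i == ')':
-- 			openpar = openpar-1
-- 		if openpar == 0:
-- 			cancel_it = 1
-- 			isbreak = idx
-- 			break
-- 	if isbreak == len(input_string)-1:
-- 		return True
-- 	else:
-- 		if input_string[0:3] in ['log','sin','cos','tan','cot','sec','csc']: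
-- 			return fullparen(input_string[3:])
-- 		else:
-- 			return False
-- ===== SOURCE B (Python) =====
-- def fullparen(input_string):
-- 	prefixes = ('log', 'sin', 'cos', 'tan', 'cot', 'sec', 'csc')
-- 	start = 0
-- 	while True:
-- 		bal = 0
-- 		rec = 0
-- 		for j in range(start, len(input_string)):
-- 			c = input_string[j]
-- 			if c == '(':
-- 				bal += 1
-- 			elif c == ')':
-- 				bal -= 1
-- 			if bal == 0:
-- 				rec = j - start
-- 				break
-- 		if rec == len(input_string) - start - 1:
-- 			return True
-- 		if input_string[start:start+3] in prefixes:
-- 			start += 3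
-- 		else:
-- 			return False
-- ===== Notes on version B (the rewrite author's own statement) =====
-- stated objective: alternative
-- what changed: Replaced A's slice-and-recurse (s[3:] creates a new string each round, recursive call) by a single iterative while-loop that keeps an integer start index into the original string and rescans from it, with no slicing of the remaining suffix and no recursion.
import Mathlib
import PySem

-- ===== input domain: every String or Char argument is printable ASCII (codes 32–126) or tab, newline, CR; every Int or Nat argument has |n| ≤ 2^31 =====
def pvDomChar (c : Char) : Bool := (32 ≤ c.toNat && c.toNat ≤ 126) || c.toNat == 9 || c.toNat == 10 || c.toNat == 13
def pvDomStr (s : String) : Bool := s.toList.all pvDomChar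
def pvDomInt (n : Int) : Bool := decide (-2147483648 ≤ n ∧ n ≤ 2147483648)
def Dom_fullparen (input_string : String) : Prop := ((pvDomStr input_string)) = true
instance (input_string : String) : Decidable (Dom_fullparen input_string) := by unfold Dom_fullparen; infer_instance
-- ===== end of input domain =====

-- B replaces A's slice-and-recurse structure by a single loop advancing a start index
-- into the original string (objective: alternative decomposition, no speed claim).

-- ===== PORT A =====

def pvPrefixes : List (List Char) :=
  [['l','o','g'], ['s','i','n'], ['c','o','s'], ['t','a','n'],
   ['c','o','t'], ['s','e','c'], ['c','s','c']]

-- A's for-loop over enumerate(input_string): carries openpar and the running idx,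
-- returns isbreak (0 if the balance never hits 0, matching A's default isbreak = 0).
def scanA : List Char → Int → Nat → Nat
  | [], _, _ => 0
  | c :: rest, openpar, idx =>
    let op := if c = '(' then openpar + 1 else if c = ')' then openpar - 1 else openpar
    if op = 0 then idx else scanA rest op (idx + 1)

theorem take3_mem_length {l : List Char} (h : l.take 3 ∈ pvPrefixes) : 3 ≤ l.length := by
  have hl : (l.take 3).length = 3 := by
    rcases (by simpa [pvPrefixes] using h :
        l.take 3 = ['l','o','g'] ∨ l.take 3 = ['s','i','n'] ∨ l.take 3 = ['c','o','s'] ∨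
        l.take 3 = ['t','a','n'] ∨ l.take 3 = ['c','o','t'] ∨ l.take 3 = ['s','e','c'] ∨
        l.take 3 = ['c','s','c']) with h|h|h|h|h|h|h <;> rw [h] <;> rfl
  simpa [List.length_take] using hl

def fullparenA (l : List Char) : Bool :=
  let isbreak := scanA l 0 0
  if (isbreak : Int) = (l.length : Int) - 1 then true
  else if l.take 3 ∈ pvPrefixes then fullparenA (l.drop 3) else false
termination_by l.length
decreasing_by
  have := take3_mem_length (by assumption)
  simp [List.length_drop]; omega

def fullparen (input_string : String) : Bool := fullparenA input_string.toList

-- ===== PORT B =====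

-- B's inner for j in range(start, len(s)) loop: returns the absolute index j where
-- the balance first hits 0 (none if it never does).
def scanB (s : List Char) (j : Nat) (bal : Int) : Option Nat :=
  if h : j < s.length then
    let b := bal + (if s[j] = '(' then 1 else if s[j] = ')' then -1 else 0)
    if b = 0 then some j else scanB s (j + 1) b
  else none
termination_by s.length - j

-- B's while-loop body, with the start index as the loop state.
def fullparenB (s : List Char) (start : Nat) : Bool :=
  let recIdx := ((scanB s start 0).map (· - start)).getD 0
  if (recIdx : Int) = (s.length : Int) - (start : Int) - 1 then true
  else if (s.drop start).take 3 ∈ pvPrefixes then fullparenB s (start + 3) else false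
termination_by s.length - start
decreasing_by
  have h3 := take3_mem_length (by assumption)
  simp [List.length_drop] at h3
  omega

def fullparen_alt (input_string : String) : Bool := fullparenB input_string.toList 0

-- ===== PRECONDITION & SPEC =====
def Spec_fullparen (input_string : String) (out : Bool) : Prop := out = fullparen_alt input_string
instance (input_string : String) (out : Bool) : Decidable (Spec_fullparen input_string out) := by unfold Spec_fullparen; infer_instance

-- ===== CLAIM (what is proved, stated in full; the proofs are below) =====
def Claim_equal_fullparen : Prop := ∀ (input_string : String), Dom_fullparen input_string → Spec_fullparen input_string (fullparen input_string)

-- ===== LEMMAS AND PROOFS =====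

-- Proof-only reference scan: first relative index where the balance hits 0.
def scanO : List Char → Int → Option Nat
  | [], _ => none
  | c :: rest, bal =>
    let b := bal + (if c = '(' then 1 else if c = ')' then -1 else 0)
    if b = 0 then some 0 else (scanO rest b).map (· + 1)

theorem scanA_eq_scanO (l : List Char) : ∀ bal idx,
    scanA l bal idx = ((scanO l bal).map (· + idx)).getD 0 := by
  induction l with
  | nil => intro bal idx; simp [scanA, scanO]
  | cons c rest ih =>
    intro bal idx
    simp only [scanA, scanO]
    by_cases hb : bal + (if c = '(' then 1 else if c = ')' then -1 else 0) = 0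
    · have : (if c = '(' then bal + 1 else if c = ')' then bal - 1 else bal) =
          bal + (if c = '(' then 1 else if c = ')' then -1 else 0) := by
        split_ifs <;> ring
      simp [this, hb]
    · have : (if c = '(' then bal + 1 else if c = ')' then bal - 1 else bal) =
          bal + (if c = '(' then 1 else if c = ')' then -1 else 0) := by
        split_ifs <;> ring
      rw [this]
      simp only [hb]
      rw [ih]
      cases scanO rest (bal + (if c = '(' then 1 else if c = ')' then -1 else 0)) with
      | none => simp
      | some k => simp [Nat.add_assoc, Nat.add_comm 1 idx]

theorem scanB_eq_scanO (s : List Char) : ∀ j bal,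
    scanB s j bal = (scanO (s.drop j) bal).map (· + j) := by
  intro j
  induction hn : s.length - j using Nat.strong_induction_on generalizing j with
  | _ n ih =>
    intro bal
    rw [scanB]
    by_cases h : j < s.length
    · have hd : s.drop j = s[j] :: s.drop (j + 1) := by
        rw [List.drop_eq_getElem_cons h]
      rw [hd]
      simp only [scanO, dif_pos h]
      by_cases hb : bal + (if s[j] = '(' then 1 else if s[j] = ')' then -1 else 0) = 0
      · simp [hb]
      · rw [if_neg hb, ih (s.length - (j + 1)) (by omega) (j + 1) rfl]
        simp only [if_neg hb, Option.map_map]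
        cases scanO (s.drop (j + 1)) (bal + (if s[j] = '(' then 1 else if s[j] = ')' then -1 else 0)) with
        | none => simp
        | some k => simp [Nat.add_comm 1 j]
    · have : s.drop j = [] := List.drop_eq_nil_of_le (by omega)
      simp [dif_neg h, this, scanO]

theorem fullparenB_eq_fullparenA (s : List Char) : ∀ start, start ≤ s.length →
    fullparenB s start = fullparenA (s.drop start) := by
  intro start
  induction hn : s.length - start using Nat.strong_induction_on generalizing start with
  | _ n ih =>
    intro hle
    rw [fullparenB, fullparenA]
    have hrec : ((scanB s start 0).map (· - start)).getD 0 = scanA (s.drop start) 0 0 := by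
      rw [scanB_eq_scanO, scanA_eq_scanO]
      cases scanO (s.drop start) 0 with
      | none => simp
      | some k => simp
    have hlen : ((s.drop start).length : Int) - 1 = (s.length : Int) - (start : Int) - 1 := by
      simp [List.length_drop]; omega
    rw [hrec, hlen]
    by_cases hif : (↑(scanA (s.drop start) 0 0) : Int) = (s.length : Int) - (start : Int) - 1
    · simp [hif]
    · rw [if_neg hif, if_neg hif]
      by_cases hp : (s.drop start).take 3 ∈ pvPrefixes
      · have h3 := take3_mem_length hp
        simp only [List.length_drop] at h3
        rw [if_pos hp, if_pos hp,
          ih (s.length - (start + 3)) (by omega) (start + 3) rfl (by omega)]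
        congr 1
        rw [List.drop_drop]
      · simp [hp]

-- ===== VERDICT (by name: the statement is the Claim_ definition above) =====
theorem fullparen_spec : Claim_equal_fullparen := by
  intro s _
  unfold Spec_fullparen fullparen fullparen_alt
  rw [fullparenB_eq_fullparenA s.toList 0 (by omega)]
  simp
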